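-- pv_equiv track=rewrite | github.com/georgeded/group-2-assignment-1-password-security-analyzer | src/password_check.py | suggest_password_improvements
-- ===== SOURCE A (Python) =====
-- import string
--
-- def has_sequential_chars(password, seq_len=4):
--     for i in range(len(password) - seq_len + 1):
--         segment = password[i:i + seq_len]
--         if segment.isalpha() and segment == ''.join(sorted(segment)):
--             return True
--         if segment.isdigit() and segment == ''.join(sorted(segment)):
--             return True
--     return False
--
-- def is_common_password(password):
--     common_passwords = [
--         "123456", "password", "123456789", "qwerty",
--         "abc123", "letmein", "welcome", "admin", "12345678",
--         "password1", "1234567", "iloveyou", "12345",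
--         "1234567890", "123123", "qwertyuiop", "monkey",
--         "1234", "sunshine", "123321", "trustno1",
--         "dragon", "baseball", "football", "123456a", "1q2w3e4r"
--         "123456789a", "qwerty123", "1qaz2wsx", "qazwsx",
--         "1q2w3e", "qwerty1", "123qwe", "password123"
--     ]
--     return password in common_passwords
--
-- def has_repeated_chars(password, threshold=3):
--     return any(password.count(char) > threshold for char in set(password))
--
-- def suggest_password_improvements(password):
--     suggestions = []
--
--     if len(password) < 8:
--         suggestions.append("Increase the password length to at least 8 characters.")
--     if not any(char.isupper() for char in password):
--         suggestions.append("Add at least one uppercase letter.")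
--     if not any(char.islower() for char in password):
--         suggestions.append("Add at least one lowercase letter.")
--     if not any(char.isdigit() for char in password):
--         suggestions.append("Include at least one digit.")
--     if not any(char in string.punctuation for char in password):
--         suggestions.append("Include at least one special character.")
--     if has_sequential_chars(password):
--         suggestions.append("Avoid sequential characters like 'abcd' or '1234'.")
--     if has_repeated_chars(password):
--         suggestions.append("Avoid repeated characters.")
--     if is_common_password(password):
--         suggestions.append("Avoid using common passwords.")
--
--     return suggestions if suggestions else ["Your password is strong!"]
-- ===== SOURCE B (Python) =====
-- import string
--
-- # note: A's common-password list contains the adjacent literals "1q2w3e4r" "123456789a",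
-- # which concatenate to the single entry "1q2w3e4r123456789a"
-- _COMMON_PASSWORDS = (
--     "123456", "password", "123456789", "qwerty",
--     "abc123", "letmein", "welcome", "admin", "12345678",
--     "password1", "1234567", "iloveyou", "12345",
--     "1234567890", "123123", "qwertyuiop", "monkey",
--     "1234", "sunshine", "123321", "trustno1",
--     "dragon", "baseball", "football", "123456a", "1q2w3e4r123456789a",
--     "qwerty123", "1qaz2wsx", "qazwsx",
--     "1q2w3e", "qwerty1", "123qwe", "password123",
-- )
--
--
-- def _link(a, b):
--     # adjacent pair belonging to one ordered run (both letters or both digits, non-decreasing)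
--     return ((a.isalpha() and b.isalpha()) or (a.isdigit() and b.isdigit())) and a <= b
--
--
-- def suggest_password_improvements(password):
--     chars = set(password)
--     links = [_link(a, b) for a, b in zip(password, password[1:])]
--     ordered = sorted(password)
--     rules = [
--         (len(password) < 8,
--          "Increase the password length to at least 8 characters."),
--         (chars.isdisjoint(string.ascii_uppercase),
--          "Add at least one uppercase letter."),
--         (chars.isdisjoint(string.ascii_lowercase),
--          "Add at least one lowercase letter."),
--         (chars.isdisjoint(string.digits),
--          "Include at least one digit."),
--         (chars.isdisjoint(string.punctuation),
--          "Include at least one special character."),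
--         (any(x and y and z for x, y, z in zip(links, links[1:], links[2:])),
--          "Avoid sequential characters like 'abcd' or '1234'."),
--         (any(a == b for a, b in zip(ordered, ordered[3:])),
--          "Avoid repeated characters."),
--         (password in _COMMON_PASSWORDS,
--          "Avoid using common passwords."),
--     ]
--     return [msg for cond, msg in rules if cond] or ["Your password is strong!"]
-- ===== Notes on version B (the rewrite author's own statement) =====
-- stated objective: alternative
-- what changed: B is table-driven (one rule list filtered by a comprehension instead of A's if/append chain), detects character classes by set-disjointness against the alphabet constants instead of per-character any() scans, detects sequential runs by zipping a precomputed adjacent-pair link list in triples instead of sorting each 4-character slice, and detects repeated characters by sorting the password once and comparing it with its own 3-shift instead of counting every distinct character.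
import Mathlib
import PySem

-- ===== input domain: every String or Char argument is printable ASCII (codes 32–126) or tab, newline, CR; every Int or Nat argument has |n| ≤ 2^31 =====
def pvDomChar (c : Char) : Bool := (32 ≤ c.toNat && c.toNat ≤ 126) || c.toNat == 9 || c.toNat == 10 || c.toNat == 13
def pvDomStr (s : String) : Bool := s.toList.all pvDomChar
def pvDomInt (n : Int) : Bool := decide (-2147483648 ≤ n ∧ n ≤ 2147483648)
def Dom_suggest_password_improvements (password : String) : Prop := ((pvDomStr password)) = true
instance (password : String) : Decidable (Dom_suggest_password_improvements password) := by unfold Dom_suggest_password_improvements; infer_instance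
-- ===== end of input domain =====

-- B is table-driven: one rule list (set-disjointness class checks, a zipped link-run
-- sequential check, a sorted-shift repeated check) filtered by a comprehension, instead
-- of A's if/append chain of separate scans (objective: alternative, same order of cost).

-- ===== PORT A =====
-- string.punctuation
def pvPunct : List Char := "!\"#$%&'()*+,-./:;<=>?@[\\]^_`{|}~".toList

-- A's has_sequential_chars with seq_len = 4
def pvHasSequentialChars (cs : List Char) : Bool :=
  (PySem.List.pyRange 0 ((cs.length : Int) - 4 + 1) 1).any fun i =>
    let segment := PySem.List.slice cs (some i) (some (i + 4))
    (PySem.Chars.strIsalpha segment && decide (segment = PySem.List.sorted segment (fun c => c)))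
    || (PySem.Chars.strIsdigit segment && decide (segment = PySem.List.sorted segment (fun c => c)))

-- note the adjacent string literals "1q2w3e4r" "123456789a" in A concatenate to one entry
def pvCommonPasswords : List String :=
  ["123456", "password", "123456789", "qwerty",
   "abc123", "letmein", "welcome", "admin", "12345678",
   "password1", "1234567", "iloveyou", "12345",
   "1234567890", "123123", "qwertyuiop", "monkey",
   "1234", "sunshine", "123321", "trustno1",
   "dragon", "baseball", "football", "123456a", "1q2w3e4r123456789a",
   "qwerty123", "1qaz2wsx", "qazwsx",
   "1q2w3e", "qwerty1", "123qwe", "password123"]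

def pvIsCommonPassword (password : String) : Bool := pvCommonPasswords.contains password

-- A's has_repeated_chars with threshold = 3
def pvHasRepeatedChars (cs : List Char) : Bool :=
  (PySem.Set.ofList cs).any fun c => decide (3 < PySem.List.count cs c)

def suggest_password_improvements (password : String) : List String :=
  let cs := password.toList
  let suggestions : List String := []
  let suggestions := if cs.length < 8 then suggestions ++ ["Increase the password length to at least 8 characters."] else suggestions
  let suggestions := if !(cs.any fun c => PySem.Chars.isupper c) then suggestions ++ ["Add at least one uppercase letter."] else suggestions
  let suggestions := if !(cs.any fun c => PySem.Chars.islower c) then suggestions ++ ["Add at least one lowercase letter."] else suggestions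
  let suggestions := if !(cs.any fun c => PySem.Chars.isdigit c) then suggestions ++ ["Include at least one digit."] else suggestions
  let suggestions := if !(cs.any fun c => pvPunct.contains c) then suggestions ++ ["Include at least one special character."] else suggestions
  let suggestions := if pvHasSequentialChars cs then suggestions ++ ["Avoid sequential characters like 'abcd' or '1234'."] else suggestions
  let suggestions := if pvHasRepeatedChars cs then suggestions ++ ["Avoid repeated characters."] else suggestions
  let suggestions := if pvIsCommonPassword password then suggestions ++ ["Avoid using common passwords."] else suggestions
  if suggestions.isEmpty then ["Your password is strong!"] else suggestions

-- ===== PORT B =====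
-- string.ascii_uppercase / ascii_lowercase / digits
def pvUpperList : List Char := "ABCDEFGHIJKLMNOPQRSTUVWXYZ".toList
def pvLowerList : List Char := "abcdefghijklmnopqrstuvwxyz".toList
def pvDigitList : List Char := "0123456789".toList

-- B's _link: adjacent pair belonging to one ordered run
def pvLink (a b : Char) : Bool :=
  ((PySem.Chars.isalpha a && PySem.Chars.isalpha b)
    || (PySem.Chars.isdigit a && PySem.Chars.isdigit b)) && decide (a ≤ b)

def suggest_password_improvements_alt (password : String) : List String :=
  let cs := password.toList
  let chars := PySem.Set.ofList cs
  let links := (List.zip cs (cs.drop 1)).map fun p => pvLink p.1 p.2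
  let ordered := PySem.List.sorted cs (fun c => c)
  let rules : List (Bool × String) :=
    [(decide (cs.length < 8),
      "Increase the password length to at least 8 characters."),
     (PySem.Set.isdisjoint chars pvUpperList,
      "Add at least one uppercase letter."),
     (PySem.Set.isdisjoint chars pvLowerList,
      "Add at least one lowercase letter."),
     (PySem.Set.isdisjoint chars pvDigitList,
      "Include at least one digit."),
     (PySem.Set.isdisjoint chars pvPunct,
      "Include at least one special character."),
     ((List.zip links (List.zip (links.drop 1) (links.drop 2))).any fun t => t.1 && t.2.1 && t.2.2,
      "Avoid sequential characters like 'abcd' or '1234'."),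
     ((List.zip ordered (ordered.drop 3)).any fun p => p.1 == p.2,
      "Avoid repeated characters."),
     (pvCommonPasswords.contains password,
      "Avoid using common passwords.")]
  let out := (rules.filter fun r => r.1).map fun r => r.2
  if out.isEmpty then ["Your password is strong!"] else out

-- ===== PRECONDITION & SPEC =====
def Spec_suggest_password_improvements (password : String) (out : List String) : Prop := out = suggest_password_improvements_alt password
instance (password : String) (out : List String) : Decidable (Spec_suggest_password_improvements password out) := by unfold Spec_suggest_password_improvements; infer_instance

-- ===== CLAIM (what is proved, stated in full; the proofs are below) =====
def Claim_equal_suggest_password_improvements : Prop := ∀ (password : String), Dom_suggest_password_improvements password → Spec_suggest_password_improvements password (suggest_password_improvements password)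

-- ===== LEMMAS AND PROOFS =====

-- character-class ranges
theorem pv_isupper_iff (c : Char) : PySem.Chars.isupper c = true ↔ 65 ≤ c.toNat ∧ c.toNat ≤ 90 := by
  rw [PySem.Chars.isupper, Bool.and_eq_true, decide_eq_true_eq, decide_eq_true_eq,
      Char.le_def, Char.le_def, UInt32.le_iff_toNat_le, UInt32.le_iff_toNat_le]
  exact Iff.rfl

theorem pv_islower_iff (c : Char) : PySem.Chars.islower c = true ↔ 97 ≤ c.toNat ∧ c.toNat ≤ 122 := by
  rw [PySem.Chars.islower, Bool.and_eq_true, decide_eq_true_eq, decide_eq_true_eq,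
      Char.le_def, Char.le_def, UInt32.le_iff_toNat_le, UInt32.le_iff_toNat_le]
  exact Iff.rfl

theorem pv_isdigit_iff (c : Char) : PySem.Chars.isdigit c = true ↔ 48 ≤ c.toNat ∧ c.toNat ≤ 57 := by
  rw [PySem.Chars.isdigit, Bool.and_eq_true, decide_eq_true_eq, decide_eq_true_eq,
      Char.le_def, Char.le_def, UInt32.le_iff_toNat_le, UInt32.le_iff_toNat_le]
  exact Iff.rfl

theorem pv_mem_ofNat_range (c : Char) (a n : Nat) (h : a + n ≤ 1000) :
    c ∈ List.map Char.ofNat (List.range' a n) ↔ a ≤ c.toNat ∧ c.toNat < a + n := by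
  simp only [List.mem_map, List.mem_range']
  constructor
  · rintro ⟨m, ⟨i, hi, rfl⟩, rfl⟩
    have hv : (a + 1 * i).isValidChar := Or.inl (by omega)
    rw [Char.toNat_ofNat, if_pos hv]
    omega
  · rintro ⟨h1, h2⟩
    exact ⟨c.toNat, ⟨c.toNat - a, by omega, by omega⟩, Char.ofNat_toNat c⟩

theorem pv_upper_eq_range : pvUpperList = List.map Char.ofNat (List.range' 65 26) := by decide
theorem pv_lower_eq_range : pvLowerList = List.map Char.ofNat (List.range' 97 26) := by decide
theorem pv_digit_eq_range : pvDigitList = List.map Char.ofNat (List.range' 48 10) := by decide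

theorem pv_upper_contains (c : Char) : pvUpperList.contains c = PySem.Chars.isupper c := by
  rw [Bool.eq_iff_iff, List.contains_iff_mem, pv_upper_eq_range,
      pv_mem_ofNat_range c 65 26 (by omega), pv_isupper_iff]
  omega

theorem pv_lower_contains (c : Char) : pvLowerList.contains c = PySem.Chars.islower c := by
  rw [Bool.eq_iff_iff, List.contains_iff_mem, pv_lower_eq_range,
      pv_mem_ofNat_range c 97 26 (by omega), pv_islower_iff]
  omega

theorem pv_digit_contains (c : Char) : pvDigitList.contains c = PySem.Chars.isdigit c := by
  rw [Bool.eq_iff_iff, List.contains_iff_mem, pv_digit_eq_range,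
      pv_mem_ofNat_range c 48 10 (by omega), pv_isdigit_iff]
  omega

theorem pv_any_ofList {α : Type} [BEq α] [LawfulBEq α] (cs : List α) (p : α → Bool) :
    (PySem.Set.ofList cs).any p = cs.any p := by
  rw [Bool.eq_iff_iff]
  simp only [List.any_eq_true]
  constructor
  · rintro ⟨x, hx, hp⟩; exact ⟨x, (PySem.Set.mem_ofList cs x).mp hx, hp⟩
  · rintro ⟨x, hx, hp⟩; exact ⟨x, (PySem.Set.mem_ofList cs x).mpr hx, hp⟩

theorem pv_disjoint_eq (cs lst : List Char) :
    PySem.Set.isdisjoint (PySem.Set.ofList cs) lst = !(cs.any fun c => lst.contains c) := by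
  unfold PySem.Set.isdisjoint
  rw [pv_any_ofList]
  rfl

theorem pv_disjoint_upper (cs : List Char) :
    PySem.Set.isdisjoint (PySem.Set.ofList cs) pvUpperList = !(cs.any fun c => PySem.Chars.isupper c) := by
  rw [pv_disjoint_eq]
  congr 1
  exact PySem.List.any_congr_mem fun c _ => pv_upper_contains c

theorem pv_disjoint_lower (cs : List Char) :
    PySem.Set.isdisjoint (PySem.Set.ofList cs) pvLowerList = !(cs.any fun c => PySem.Chars.islower c) := by
  rw [pv_disjoint_eq]
  congr 1
  exact PySem.List.any_congr_mem fun c _ => pv_lower_contains c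

theorem pv_disjoint_digit (cs : List Char) :
    PySem.Set.isdisjoint (PySem.Set.ofList cs) pvDigitList = !(cs.any fun c => PySem.Chars.isdigit c) := by
  rw [pv_disjoint_eq]
  congr 1
  exact PySem.List.any_congr_mem fun c _ => pv_digit_contains c

theorem pv_disjoint_punct (cs : List Char) :
    PySem.Set.isdisjoint (PySem.Set.ofList cs) pvPunct = !(cs.any fun c => pvPunct.contains c) := by
  rw [pv_disjoint_eq]

-- alpha and digit are mutually exclusive
theorem pv_alpha_not_digit (c : Char) (h : PySem.Chars.isalpha c = true) : ¬ PySem.Chars.isdigit c = true := by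
  intro hd
  rw [pv_isdigit_iff] at hd
  rcases (Bool.or_eq_true _ _).mp h with h' | h'
  · rw [pv_isupper_iff] at h'; omega
  · rw [pv_islower_iff] at h'; omega

-- the common window specification
def pvSeqSpec (cs : List Char) : Prop :=
  ∃ i : Nat, i + 4 ≤ cs.length ∧
    pvLink (cs.getD i ' ') (cs.getD (i+1) ' ') = true ∧
    pvLink (cs.getD (i+1) ' ') (cs.getD (i+2) ' ') = true ∧
    pvLink (cs.getD (i+2) ' ') (cs.getD (i+3) ' ') = true

theorem pv_sorted4 (a b c d : Char) :
    [a,b,c,d] = PySem.List.sorted [a,b,c,d] (fun c => c) ↔ (a ≤ b ∧ b ≤ c ∧ c ≤ d) := by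
  constructor
  · intro h
    have hp := PySem.List.sorted_pairwise [a,b,c,d] (fun c => c)
    rw [← h] at hp
    simp [List.pairwise_cons] at hp
    tauto
  · rintro ⟨h1, h2, h3⟩
    refine (PySem.List.sorted_eq_self_of_pairwise _ _ ?_).symm
    simp [List.pairwise_cons]
    exact ⟨⟨h1, le_trans h1 h2, le_trans h1 (le_trans h2 h3)⟩, ⟨h2, le_trans h2 h3⟩, h3⟩

theorem pv_take4 (l : List Char) (h : 4 ≤ l.length) :
    l.take 4 = [l.getD 0 ' ', l.getD 1 ' ', l.getD 2 ' ', l.getD 3 ' '] := by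
  match l with
  | a::b::c::d::t => simp [List.getD]
  | [] => simp at h
  | [_] => simp at h
  | [_,_] => simp at h
  | [_,_,_] => simp at h

theorem pv_drop4 (cs : List Char) (n : Nat) (h : n + 4 ≤ cs.length) :
    (cs.drop n).take 4 = [cs.getD n ' ', cs.getD (n+1) ' ', cs.getD (n+2) ' ', cs.getD (n+3) ' '] := by
  rw [pv_take4 _ (by simp; omega)]
  simp [List.getD, List.getElem?_drop]

-- A's sorted-slice window is three chained links
theorem pv_win_link (a b c d : Char) :
    ((PySem.Chars.strIsalpha [a,b,c,d] && decide ([a,b,c,d] = PySem.List.sorted [a,b,c,d] (fun c => c)))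
      || (PySem.Chars.strIsdigit [a,b,c,d] && decide ([a,b,c,d] = PySem.List.sorted [a,b,c,d] (fun c => c)))) = true
    ↔ (pvLink a b = true ∧ pvLink b c = true ∧ pvLink c d = true) := by
  simp only [PySem.Chars.strIsalpha, PySem.Chars.strIsdigit, pvLink, Bool.or_eq_true,
    Bool.and_eq_true, decide_eq_true_eq, pv_sorted4, List.all_cons, List.all_nil,
    List.isEmpty_cons, Bool.not_false, Bool.true_and, Bool.and_true]
  constructor
  · rintro (⟨⟨ha, hb, hc, hd⟩, h1, h2, h3⟩ | ⟨⟨ha, hb, hc, hd⟩, h1, h2, h3⟩) <;>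
      exact ⟨⟨by tauto, h1⟩, ⟨by tauto, h2⟩, ⟨by tauto, h3⟩⟩
  · rintro ⟨⟨hab, h1⟩, ⟨hbc, h2⟩, ⟨hcd, h3⟩⟩
    rcases hab with ⟨ha, hb⟩ | ⟨ha, hb⟩
    · left
      rcases hbc with ⟨_, hc⟩ | ⟨hb', _⟩
      · rcases hcd with ⟨_, hd⟩ | ⟨hc', _⟩
        · exact ⟨⟨ha, hb, hc, hd⟩, h1, h2, h3⟩
        · exact absurd hc' (pv_alpha_not_digit _ hc)
      · exact absurd hb' (pv_alpha_not_digit _ hb)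
    · right
      rcases hbc with ⟨hb', _⟩ | ⟨_, hc⟩
      · exact absurd hb (pv_alpha_not_digit _ hb')
      · rcases hcd with ⟨hc', _⟩ | ⟨_, hd⟩
        · exact absurd hc (pv_alpha_not_digit _ hc')
        · exact ⟨⟨ha, hb, hc, hd⟩, h1, h2, h3⟩

theorem pv_links_length (cs : List Char) :
    ((List.zip cs (cs.drop 1)).map fun p => pvLink p.1 p.2).length = cs.length - 1 := by
  simp only [List.length_map, List.length_zip, List.length_drop]
  omega

theorem pv_links_getElem (cs : List Char) (i : Nat)
    (h : i < ((List.zip cs (cs.drop 1)).map fun p => pvLink p.1 p.2).length) :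
    ((List.zip cs (cs.drop 1)).map fun p => pvLink p.1 p.2)[i]
      = pvLink (cs.getD i ' ') (cs.getD (i+1) ' ') := by
  have hlen : i + 1 < cs.length := by rw [pv_links_length] at h; omega
  rw [List.getElem_map, List.getElem_zip, List.getElem_drop]
  have e : 1 + i = i + 1 := Nat.add_comm 1 i
  simp only [e]
  rw [List.getD_eq_getElem _ _ (by omega), List.getD_eq_getElem _ _ hlen]

theorem pv_A_seq (cs : List Char) : pvHasSequentialChars cs = true ↔ pvSeqSpec cs := by
  unfold pvHasSequentialChars pvSeqSpec
  rw [List.any_eq_true]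
  constructor
  · rintro ⟨i, hi, hw⟩
    rw [PySem.List.mem_pyRange_one] at hi
    obtain ⟨h0, h1⟩ := hi
    obtain ⟨n, rfl⟩ := Int.eq_ofNat_of_zero_le h0
    have hn4 : n + 4 ≤ cs.length := by omega
    refine ⟨n, hn4, ?_⟩
    simp only at hw
    have hslice : PySem.List.slice cs (some (n:Int)) (some ((n:Int)+4)) = (cs.drop n).take 4 := by
      have h4 : ((n:Int) + 4) = ((n:Int) + ((4:Nat):Int)) := by norm_num
      rw [h4, PySem.List.slice_natCast_add]
    rw [hslice, pv_drop4 cs n hn4] at hw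
    exact (pv_win_link _ _ _ _).mp hw
  · rintro ⟨n, hn4, h1, h2, h3⟩
    refine ⟨(n:Int), PySem.List.mem_pyRange_one.mpr ⟨by omega, by omega⟩, ?_⟩
    simp only
    have hslice : PySem.List.slice cs (some (n:Int)) (some ((n:Int)+4)) = (cs.drop n).take 4 := by
      have h4 : ((n:Int) + 4) = ((n:Int) + ((4:Nat):Int)) := by norm_num
      rw [h4, PySem.List.slice_natCast_add]
    rw [hslice, pv_drop4 cs n hn4]
    exact (pv_win_link _ _ _ _).mpr ⟨h1, h2, h3⟩

theorem pv_B_seq (cs : List Char) :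
    ((List.zip ((List.zip cs (cs.drop 1)).map fun p => pvLink p.1 p.2)
        (List.zip (((List.zip cs (cs.drop 1)).map fun p => pvLink p.1 p.2).drop 1)
                  (((List.zip cs (cs.drop 1)).map fun p => pvLink p.1 p.2).drop 2))).any
      fun t => t.1 && t.2.1 && t.2.2) = true ↔ pvSeqSpec cs := by
  set links := (List.zip cs (cs.drop 1)).map fun p => pvLink p.1 p.2 with hl
  have hL : links.length = cs.length - 1 := pv_links_length cs
  rw [List.any_eq_true]
  constructor
  · rintro ⟨t, ht, hp⟩
    rw [List.mem_iff_getElem] at ht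
    obtain ⟨j, hj, rfl⟩ := ht
    have hjl : j + 3 < cs.length := by
      simp only [List.length_zip, List.length_drop, hL] at hj; omega
    rw [Bool.and_eq_true, Bool.and_eq_true] at hp
    simp only [List.getElem_zip, List.getElem_drop] at hp
    have e1 : 1 + j = j + 1 := Nat.add_comm 1 j
    have e2 : 2 + j = j + 2 := Nat.add_comm 2 j
    simp only [e1, e2] at hp
    refine ⟨j, by omega, ?_, ?_, ?_⟩
    · rw [← pv_links_getElem cs j (by rw [pv_links_length]; omega)]
      exact hp.1.1
    · rw [← pv_links_getElem cs (j+1) (by rw [pv_links_length]; omega)]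
      exact hp.1.2
    · rw [← pv_links_getElem cs (j+2) (by rw [pv_links_length]; omega)]
      exact hp.2
  · rintro ⟨n, hn4, h1, h2, h3⟩
    have hZ : n < ((List.zip links (List.zip (links.drop 1) (links.drop 2)))).length := by
      simp only [List.length_zip, List.length_drop, hL]; omega
    refine ⟨_, List.mem_iff_getElem.mpr ⟨n, hZ, rfl⟩, ?_⟩
    simp only [List.getElem_zip, List.getElem_drop]
    rw [Bool.and_eq_true, Bool.and_eq_true]
    have e1 : 1 + n = n + 1 := Nat.add_comm 1 n
    have e2 : 2 + n = n + 2 := Nat.add_comm 2 n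
    simp only [hl, e1, e2]
    rw [pv_links_getElem cs n (by rw [pv_links_length]; omega),
        pv_links_getElem cs (n+1) (by rw [pv_links_length]; omega),
        pv_links_getElem cs (n+2) (by rw [pv_links_length]; omega)]
    exact ⟨⟨h1, h2⟩, h3⟩

theorem pv_seq_eq (cs : List Char) :
    ((List.zip ((List.zip cs (cs.drop 1)).map fun p => pvLink p.1 p.2)
        (List.zip (((List.zip cs (cs.drop 1)).map fun p => pvLink p.1 p.2).drop 1)
                  (((List.zip cs (cs.drop 1)).map fun p => pvLink p.1 p.2).drop 2))).any
      fun t => t.1 && t.2.1 && t.2.2) = pvHasSequentialChars cs := by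
  rw [Bool.eq_iff_iff, pv_B_seq, pv_A_seq]

-- repeated characters
def pvRepSpec (cs : List Char) : Prop := ∃ c ∈ cs, 3 < List.count c cs

theorem pv_A_rep (cs : List Char) : pvHasRepeatedChars cs = true ↔ pvRepSpec cs := by
  unfold pvHasRepeatedChars pvRepSpec PySem.List.count
  rw [pv_any_ofList]
  simp [List.any_eq_true]

-- a ≤-pairwise list is monotone on indices
theorem pv_sorted_mono (s : List Char) (hp : List.Pairwise (fun a b => a ≤ b) s)
    (i j : Nat) (hij : i ≤ j) (hj : j < s.length) :
    s[i]'(by omega) ≤ s[j] := by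
  rcases Nat.lt_or_ge i j with h | h
  · exact List.pairwise_iff_getElem.mp hp i j (by omega) hj h
  · have : i = j := by omega
    subst this
    exact le_refl _

theorem pv_B_rep (cs : List Char) :
    ((List.zip (PySem.List.sorted cs (fun c => c)) ((PySem.List.sorted cs (fun c => c)).drop 3)).any
      fun p => p.1 == p.2) = true ↔ pvRepSpec cs := by
  set s := PySem.List.sorted cs (fun c => c) with hs
  have hmono := pv_sorted_mono s (by rw [hs]; exact PySem.List.sorted_pairwise cs (fun c => c))
  have hperm : s.Perm cs := PySem.List.sorted_perm cs (fun c => c) false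
  have hlen : s.length = cs.length := hperm.length_eq
  rw [List.any_eq_true]
  constructor
  · rintro ⟨t, ht, hp⟩
    rw [List.mem_iff_getElem] at ht
    obtain ⟨j, hj, rfl⟩ := ht
    have hjl : j + 4 ≤ s.length := by
      simp only [List.length_zip, List.length_drop] at hj; omega
    simp only [List.getElem_zip, List.getElem_drop, beq_iff_eq] at hp
    set c := s[j]'(by omega) with hc
    have h1 : s[j+1]'(by omega) = c := le_antisymm
      (by have := hmono (j+1) (3+j) (by omega) (by omega); rw [← hp] at this; exact this)
      (hmono j (j+1) (by omega) (by omega))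
    have h2 : s[j+2]'(by omega) = c := le_antisymm
      (by have := hmono (j+2) (3+j) (by omega) (by omega); rw [← hp] at this; exact this)
      (hmono j (j+2) (by omega) (by omega))
    have h3 : s[j+3]'(by omega) = c := by
      have e : j + 3 = 3 + j := Nat.add_comm j 3
      simp only [e]; exact hp.symm
    have htake : (s.drop j).take 4 = [c, c, c, c] := by
      rw [pv_drop4 s j hjl]
      rw [List.getD_eq_getElem _ _ (by omega), List.getD_eq_getElem _ _ (by omega),
          List.getD_eq_getElem _ _ (by omega), List.getD_eq_getElem _ _ (by omega)]
      rw [h1, h2, h3]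
    have hsub : List.Sublist [c, c, c, c] s := by
      rw [← htake]
      exact ((List.take_prefix _ _).sublist).trans (List.drop_sublist _ _)
    have hcount : 3 < List.count c s := by
      have := hsub.count_le c
      simp at this
      omega
    refine ⟨c, ?_, ?_⟩
    · exact hperm.mem_iff.mp (List.getElem_mem _)
    · rw [← hperm.count_eq]; exact hcount
  · rintro ⟨c, hc, hcount⟩
    have hcs : 3 < List.count c s := by rw [hperm.count_eq]; exact hcount
    have hsub : List.Sublist (List.replicate 4 c) s := List.replicate_sublist_iff.mpr (by omega)
    obtain ⟨is, his, hpw⟩ := List.sublist_eq_map_getElem hsub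
    obtain _|⟨i1,is⟩ := is; · simp [List.replicate] at his
    obtain _|⟨i2,is⟩ := is; · simp [List.replicate] at his
    obtain _|⟨i3,is⟩ := is; · simp [List.replicate] at his
    obtain _|⟨i4,is⟩ := is; · simp [List.replicate] at his
    obtain _|⟨i5,is⟩ := is
    swap
    · exact absurd (congrArg List.length his) (by simp [List.replicate])
    simp only [List.map_cons, List.map_nil, List.replicate, List.cons.injEq, and_true] at his
    obtain ⟨e1, e2, e3, e4⟩ := his
    simp only [Fin.getElem_fin] at e1 e2 e3 e4
    simp only [List.pairwise_cons, List.mem_cons, List.not_mem_nil] at hpw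
    have h12 : (i1 : Nat) < i2 := hpw.1 i2 (by tauto)
    have h23 : (i2 : Nat) < i3 := hpw.2.1 i3 (by tauto)
    have h34 : (i3 : Nat) < i4 := hpw.2.2.1 i4 (by tauto)
    have hi4 : (i4 : Nat) < s.length := i4.isLt
    have hj4 : (i1 : Nat) + 4 ≤ s.length := by omega
    have hmid : s[(i1 : Nat) + 3]'(by omega) = c := by
      refine le_antisymm ?_ ?_
      · rw [e4]; exact hmono ((i1 : Nat)+3) i4 (by omega) (by omega)
      · rw [e1]; exact hmono (i1 : Nat) ((i1 : Nat)+3) (by omega) (by omega)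
    have hZ : (i1 : Nat) < ((List.zip s (s.drop 3))).length := by
      simp only [List.length_zip, List.length_drop]; omega
    refine ⟨_, List.mem_iff_getElem.mpr ⟨(i1 : Nat), hZ, rfl⟩, ?_⟩
    simp only [List.getElem_zip, List.getElem_drop, beq_iff_eq]
    have e : 3 + (i1 : Nat) = (i1 : Nat) + 3 := Nat.add_comm 3 i1
    simp only [e]
    rw [hmid, ← e1]

theorem pv_rep_eq (cs : List Char) :
    ((List.zip (PySem.List.sorted cs (fun c => c)) ((PySem.List.sorted cs (fun c => c)).drop 3)).any
      fun p => p.1 == p.2) = pvHasRepeatedChars cs := by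
  rw [Bool.eq_iff_iff, pv_B_rep, pv_A_rep]

-- the if/append chain equals the filtered rule table, for any eight booleans
theorem pv_chain (b1 b2 b3 b4 b5 b6 b7 b8 : Bool) (m1 m2 m3 m4 m5 m6 m7 m8 s : String) :
    (let l0 : List String := []
     let l1 := if b1 then l0 ++ [m1] else l0
     let l2 := if b2 then l1 ++ [m2] else l1
     let l3 := if b3 then l2 ++ [m3] else l2
     let l4 := if b4 then l3 ++ [m4] else l3
     let l5 := if b5 then l4 ++ [m5] else l4
     let l6 := if b6 then l5 ++ [m6] else l5
     let l7 := if b7 then l6 ++ [m7] else l6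
     let l8 := if b8 then l7 ++ [m8] else l7
     if l8.isEmpty then [s] else l8)
    = (let out := (([(b1,m1),(b2,m2),(b3,m3),(b4,m4),(b5,m5),(b6,m6),(b7,m7),(b8,m8)].filter
          fun r => r.1).map fun r => r.2)
       if out.isEmpty then [s] else out) := by
  cases b1 <;> cases b2 <;> cases b3 <;> cases b4 <;> cases b5 <;> cases b6 <;> cases b7 <;> cases b8 <;> rfl

-- ===== VERDICT (by name: the statement is the Claim_ definition above) =====
theorem suggest_password_improvements_spec : Claim_equal_suggest_password_improvements := by
  intro password _
  unfold Spec_suggest_password_improvements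
  unfold suggest_password_improvements suggest_password_improvements_alt
  simp only [pv_disjoint_upper, pv_disjoint_lower, pv_disjoint_digit, pv_disjoint_punct,
    pv_seq_eq, pv_rep_eq]
  rw [show pvCommonPasswords.contains password = pvIsCommonPassword password from rfl]
  rw [show (if password.toList.length < 8 then ([] : List String) ++ ["Increase the password length to at least 8 characters."] else []) =
        (if decide (password.toList.length < 8) then ([] : List String) ++ ["Increase the password length to at least 8 characters."] else []) from by
      simp only [decide_eq_true_eq]]
  exact pv_chain _ _ _ _ _ _ _ _ _ _ _ _ _ _ _ _ _
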